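-- pv_equiv track=rewrite | github.com/ginoventa/Santander-Python | programas/desafios/sistema_atendimento.py | prioridade
-- ===== SOURCE A (Python) =====
-- def prioridade(pacientes):
--     urgente = []
--     idosos_urgente = []
--     idosos = []
--     demais = []
--
--     for paciente in pacientes:
--         if paciente[2].lower() == "urgente" and paciente[1] >= 60:
--             idosos_urgente.append(paciente)
--         elif paciente[2].lower() == "urgente":
--             urgente.append(paciente)
--         elif paciente[1] >= 60:
--             idosos.append(paciente)
--         else:
--             demais.append(paciente)
--
--     idosos_urgente = sorted(idosos_urgente, key=lambda x: x[1], reverse=True)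
--     return idosos_urgente + urgente + idosos + demais
-- ===== SOURCE B (Python) =====
-- def prioridade(pacientes):
--     def rank(p):
--         if p[2].lower() == "urgente" and p[1] >= 60:
--             return 0
--         if p[2].lower() == "urgente":
--             return 1
--         if p[1] >= 60:
--             return 2
--         return 3
--     return sorted(pacientes, key=lambda p: (rank(p), -p[1] if rank(p) == 0 else 0))
-- ===== Notes on version B (the rewrite author's own statement) =====
-- stated objective: simpler
-- what changed: Replaces the four explicit buckets, the bucket sort and the concatenation by one stable sort of the whole list under a computed (rank, secondary) key, relying on sort stability for the within-rank order.
import Mathlib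
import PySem

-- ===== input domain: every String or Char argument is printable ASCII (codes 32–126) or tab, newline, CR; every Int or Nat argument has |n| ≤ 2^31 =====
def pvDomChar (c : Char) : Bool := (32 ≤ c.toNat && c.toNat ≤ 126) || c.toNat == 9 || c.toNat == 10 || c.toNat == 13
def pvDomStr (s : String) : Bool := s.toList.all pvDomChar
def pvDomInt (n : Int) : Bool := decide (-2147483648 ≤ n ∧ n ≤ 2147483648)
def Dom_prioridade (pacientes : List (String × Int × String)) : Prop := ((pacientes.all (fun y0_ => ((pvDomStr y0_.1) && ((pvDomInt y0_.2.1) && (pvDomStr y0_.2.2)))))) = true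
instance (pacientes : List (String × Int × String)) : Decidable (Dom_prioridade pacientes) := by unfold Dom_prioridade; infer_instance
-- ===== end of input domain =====

-- B replaces A's four buckets + bucket sort + concatenation by ONE stable sort under a
-- computed (rank, secondary) key — simpler, not claimed faster.


-- ===== PORT A =====
-- A's loop sorts each patient into one of four buckets, then sorts the elderly-urgent
-- bucket by age descending (stable) and concatenates the buckets.
def prioridade (pacientes : List (String × Int × String)) : List (String × Int × String) :=
  let r := pacientes.foldl
    (fun (st : List (String × Int × String) × List (String × Int × String) ×
               List (String × Int × String) × List (String × Int × String)) paciente =>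
      let (urgente, idosos_urgente, idosos, demais) := st
      if PySem.Str.lower paciente.2.2 == "urgente" && decide (paciente.2.1 ≥ 60) then
        (urgente, idosos_urgente ++ [paciente], idosos, demais)
      else if PySem.Str.lower paciente.2.2 == "urgente" then
        (urgente ++ [paciente], idosos_urgente, idosos, demais)
      else if decide (paciente.2.1 ≥ 60) then
        (urgente, idosos_urgente, idosos ++ [paciente], demais)
      else
        (urgente, idosos_urgente, idosos, demais ++ [paciente]))
    ([], [], [], [])
  let idosos_urgente := PySem.List.sorted r.2.1 (fun x => x.2.1) true
  idosos_urgente ++ r.1 ++ r.2.2.1 ++ r.2.2.2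

-- ===== PORT B =====
-- B's rank helper (Source B's `rank`)
def pvRank (p : String × Int × String) : Int :=
  if PySem.Str.lower p.2.2 == "urgente" && decide (p.2.1 ≥ 60) then 0
  else if PySem.Str.lower p.2.2 == "urgente" then 1
  else if decide (p.2.1 ≥ 60) then 2
  else 3

def prioridade_alt (pacientes : List (String × Int × String)) : List (String × Int × String) :=
  PySem.List.sorted2 pacientes pvRank (fun p => if pvRank p == 0 then -p.2.1 else 0)

-- ===== PRECONDITION & SPEC =====
def Spec_prioridade (pacientes : List (String × Int × String)) (out : List (String × Int × String)) : Prop := out = prioridade_alt pacientes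
instance (pacientes : List (String × Int × String)) (out : List (String × Int × String)) : Decidable (Spec_prioridade pacientes out) := by unfold Spec_prioridade; infer_instance

-- ===== CLAIM (what is proved, stated in full; the proofs are below) =====
def Claim_equal_prioridade : Prop := ∀ (pacientes : List (String × Int × String)), Dom_prioridade pacientes → Spec_prioridade pacientes (prioridade pacientes)

-- ===== LEMMAS AND PROOFS =====

-- the secondary key of B's sort
def pvSec (p : String × Int × String) : Int := if pvRank p == 0 then -p.2.1 else 0

-- B's comparison (the `lt` sorted2 builds from the two keys)
def pvLt (a b : String × Int × String) : Bool :=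
  decide (pvRank a < pvRank b) || (!decide (pvRank b < pvRank a) && decide (pvSec a < pvSec b))

lemma pvRank_cases (p : String × Int × String) :
    pvRank p = 0 ∨ pvRank p = 1 ∨ pvRank p = 2 ∨ pvRank p = 3 := by
  unfold pvRank; split_ifs <;> simp

lemma pvLt_eq_rankLt (x y : String × Int × String) (h : pvRank x ≠ 0 ∨ pvRank y ≠ 0) :
    pvLt x y = decide (pvRank x < pvRank y) := by
  unfold pvLt pvSec
  by_cases hx : pvRank x = 0
  · rcases h with h | h
    · exact absurd hx h
    · have : pvRank x < pvRank y := by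
        rcases pvRank_cases y with h' | h' | h' | h' <;> omega
      simp [this]
  · by_cases hy : pvRank y = 0
    · have : ¬ pvRank x < pvRank y := by
        rcases pvRank_cases x with h' | h' | h' | h' <;> omega
      have hyx : pvRank y < pvRank x := by
        rcases pvRank_cases x with h' | h' | h' | h' <;> omega
      simp [this, hyx]
    · simp [hx, hy]

lemma pvLt_rank0 (x y : String × Int × String) (hx : pvRank x = 0) (hy : pvRank y = 0) :
    pvLt x y = decide (y.2.1 < x.2.1) := by
  unfold pvLt pvSec
  simp [hx, hy]

-- insertBy only looks at `before x ·` on members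
lemma insertBy_congr_mem (b1 b2 : (String × Int × String) → (String × Int × String) → Bool)
    (x : String × Int × String) (ys : List (String × Int × String))
    (h : ∀ y ∈ ys, b1 x y = b2 x y) :
    PySem.List.insertBy b1 x ys = PySem.List.insertBy b2 x ys := by
  induction ys with
  | nil => rfl
  | cons y t ih =>
    have hy := h y (by simp)
    simp only [PySem.List.insertBy, hy]
    split
    · rfl
    · simp [ih (fun z hz => h z (by simp [hz]))]

-- inserting x when it goes before every element of Q stays left of Q
lemma insertBy_append_of_forall_before (before : (String × Int × String) → (String × Int × String) → Bool)
    (x : String × Int × String) (P Q : List (String × Int × String))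
    (h : ∀ y ∈ Q, before x y = true) :
    PySem.List.insertBy before x (P ++ Q) = PySem.List.insertBy before x P ++ Q := by
  induction P with
  | nil =>
    cases Q with
    | nil => rfl
    | cons q t => simp [PySem.List.insertBy, h q (by simp)]
  | cons p t ih =>
    simp only [List.cons_append, PySem.List.insertBy]
    split
    · rfl
    · simp [ih]

-- the invariant of B's insertion-sort fold over A's bucket structure
lemma loopB (l s0 s1 s2 s3 : List (String × Int × String))
    (h0 : ∀ y ∈ s0, pvRank y = 0) (h1 : ∀ y ∈ s1, pvRank y = 1)
    (h2 : ∀ y ∈ s2, pvRank y = 2) (h3 : ∀ y ∈ s3, pvRank y = 3) :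
    l.foldl (fun acc x => PySem.List.insertBy pvLt x acc) (s0 ++ (s1 ++ (s2 ++ s3)))
    = (l.foldl (fun acc x => if pvRank x == 0
          then PySem.List.insertBy (fun a b => decide (b.2.1 < a.2.1)) x acc else acc) s0)
      ++ ((s1 ++ l.filter (fun x => pvRank x == 1))
      ++ ((s2 ++ l.filter (fun x => pvRank x == 2))
      ++ (s3 ++ l.filter (fun x => pvRank x == 3)))) := by
  induction l generalizing s0 s1 s2 s3 with
  | nil => simp
  | cons x l ih =>
    simp only [List.foldl_cons, List.filter_cons]
    rcases pvRank_cases x with hx | hx | hx | hx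
    · -- rank 0: insert into s0
      have hQ : ∀ y ∈ s1 ++ (s2 ++ s3), pvLt x y = true := by
        intro y hy
        have hr : pvRank y = 1 ∨ pvRank y = 2 ∨ pvRank y = 3 := by
          simp only [List.mem_append] at hy
          rcases hy with hy | hy | hy
          · exact Or.inl (h1 y hy)
          · exact Or.inr (Or.inl (h2 y hy))
          · exact Or.inr (Or.inr (h3 y hy))
        rw [pvLt_eq_rankLt x y (by rcases hr with h|h|h <;> omega)]
        rcases hr with h|h|h <;> simp [h, hx]
      rw [insertBy_append_of_forall_before _ _ _ _ hQ,
          insertBy_congr_mem pvLt (fun a b => decide (b.2.1 < a.2.1)) x s0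
            (fun y hy => pvLt_rank0 x y hx (h0 y hy))]
      have h0' : ∀ y ∈ PySem.List.insertBy (fun a b => decide (b.2.1 < a.2.1)) x s0, pvRank y = 0 := by
        intro y hy
        rcases (PySem.List.insertBy_mem_iff _ _ _ _).1 hy with rfl | hy
        · exact hx
        · exact h0 y hy
      rw [ih _ s1 s2 s3 h0' h1 h2 h3]
      simp [hx]
    · -- rank 1: append to s1
      have hP : ∀ y ∈ s0 ++ s1, pvLt x y = false := by
        intro y hy
        simp only [List.mem_append] at hy
        rw [pvLt_eq_rankLt x y (Or.inl (by omega))]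
        rcases hy with hy | hy
        · simp [hx, h0 y hy]
        · simp [hx, h1 y hy]
      have hQ : ∀ y ∈ s2 ++ s3, pvLt x y = true := by
        intro y hy
        simp only [List.mem_append] at hy
        rw [pvLt_eq_rankLt x y (Or.inl (by omega))]
        rcases hy with hy | hy
        · simp [hx, h2 y hy]
        · simp [hx, h3 y hy]
      have : s0 ++ (s1 ++ (s2 ++ s3)) = (s0 ++ s1) ++ (s2 ++ s3) := by simp
      rw [this, insertBy_append_of_forall_before _ _ _ _ hQ,
          PySem.List.insertBy_of_forall_not_before _ _ _ hP]
      have : (s0 ++ s1 ++ [x]) ++ (s2 ++ s3) = s0 ++ ((s1 ++ [x]) ++ (s2 ++ s3)) := by simp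
      rw [this, ih s0 (s1 ++ [x]) s2 s3 h0
            (by intro y hy; rcases List.mem_append.1 hy with hy | hy
                · exact h1 y hy
                · simp at hy; simpa [hy] using hx) h2 h3]
      simp [hx]
    · -- rank 2: append to s2
      have hP : ∀ y ∈ (s0 ++ s1) ++ s2, pvLt x y = false := by
        intro y hy
        simp only [List.mem_append] at hy
        rw [pvLt_eq_rankLt x y (Or.inl (by omega))]
        rcases hy with (hy | hy) | hy
        · simp [hx, h0 y hy]
        · simp [hx, h1 y hy]
        · simp [hx, h2 y hy]
      have hQ : ∀ y ∈ s3, pvLt x y = true := by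
        intro y hy
        rw [pvLt_eq_rankLt x y (Or.inl (by omega))]
        simp [hx, h3 y hy]
      have : s0 ++ (s1 ++ (s2 ++ s3)) = ((s0 ++ s1) ++ s2) ++ s3 := by simp
      rw [this, insertBy_append_of_forall_before _ _ _ _ hQ,
          PySem.List.insertBy_of_forall_not_before _ _ _ hP]
      have : ((s0 ++ s1) ++ s2 ++ [x]) ++ s3 = s0 ++ (s1 ++ ((s2 ++ [x]) ++ s3)) := by simp
      rw [this, ih s0 s1 (s2 ++ [x]) s3 h0 h1
            (by intro y hy; rcases List.mem_append.1 hy with hy | hy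
                · exact h2 y hy
                · simp at hy; simpa [hy] using hx) h3]
      simp [hx]
    · -- rank 3: append to s3
      have hP : ∀ y ∈ s0 ++ (s1 ++ (s2 ++ s3)), pvLt x y = false := by
        intro y hy
        simp only [List.mem_append] at hy
        rw [pvLt_eq_rankLt x y (Or.inl (by omega))]
        rcases hy with hy | hy | hy | hy
        · simp [hx, h0 y hy]
        · simp [hx, h1 y hy]
        · simp [hx, h2 y hy]
        · simp [hx, h3 y hy]
      rw [PySem.List.insertBy_of_forall_not_before _ _ _ hP]
      have : (s0 ++ (s1 ++ (s2 ++ s3))) ++ [x] = s0 ++ (s1 ++ (s2 ++ (s3 ++ [x]))) := by simp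
      rw [this, ih s0 s1 s2 (s3 ++ [x]) h0 h1 h2
            (by intro y hy; rcases List.mem_append.1 hy with hy | hy
                · exact h3 y hy
                · simp at hy; simpa [hy] using hx)]
      simp [hx]

-- A's bucket loop computes the four filters by rank
def stepA (st : List (String × Int × String) × List (String × Int × String) ×
               List (String × Int × String) × List (String × Int × String))
    (paciente : String × Int × String) :
    List (String × Int × String) × List (String × Int × String) ×
    List (String × Int × String) × List (String × Int × String) :=
  let (urgente, idosos_urgente, idosos, demais) := st
  if PySem.Str.lower paciente.2.2 == "urgente" && decide (paciente.2.1 ≥ 60) then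
    (urgente, idosos_urgente ++ [paciente], idosos, demais)
  else if PySem.Str.lower paciente.2.2 == "urgente" then
    (urgente ++ [paciente], idosos_urgente, idosos, demais)
  else if decide (paciente.2.1 ≥ 60) then
    (urgente, idosos_urgente, idosos ++ [paciente], demais)
  else
    (urgente, idosos_urgente, idosos, demais ++ [paciente])

lemma stepA_00 (u iu i d : List (String × Int × String)) (x : String × Int × String)
    (hu : PySem.Str.lower x.2.2 = "urgente") (ha : 60 ≤ x.2.1) :
    stepA (u, iu, i, d) x = (u, iu ++ [x], i, d) := by simp [stepA, hu, ha]

lemma stepA_01 (u iu i d : List (String × Int × String)) (x : String × Int × String)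
    (hu : PySem.Str.lower x.2.2 = "urgente") (ha : ¬ 60 ≤ x.2.1) :
    stepA (u, iu, i, d) x = (u ++ [x], iu, i, d) := by simp [stepA, hu, ha]

lemma stepA_02 (u iu i d : List (String × Int × String)) (x : String × Int × String)
    (hu : ¬ PySem.Str.lower x.2.2 = "urgente") (ha : 60 ≤ x.2.1) :
    stepA (u, iu, i, d) x = (u, iu, i ++ [x], d) := by simp [stepA, hu, ha]

lemma stepA_03 (u iu i d : List (String × Int × String)) (x : String × Int × String)
    (hu : ¬ PySem.Str.lower x.2.2 = "urgente") (ha : ¬ 60 ≤ x.2.1) :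
    stepA (u, iu, i, d) x = (u, iu, i, d ++ [x]) := by simp [stepA, hu, ha]

lemma loopA (l : List (String × Int × String))
    (u iu i d : List (String × Int × String)) :
    l.foldl
      (fun (st : List (String × Int × String) × List (String × Int × String) ×
                 List (String × Int × String) × List (String × Int × String)) paciente =>
        let (urgente, idosos_urgente, idosos, demais) := st
        if PySem.Str.lower paciente.2.2 == "urgente" && decide (paciente.2.1 ≥ 60) then
          (urgente, idosos_urgente ++ [paciente], idosos, demais)
        else if PySem.Str.lower paciente.2.2 == "urgente" then
          (urgente ++ [paciente], idosos_urgente, idosos, demais)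
        else if decide (paciente.2.1 ≥ 60) then
          (urgente, idosos_urgente, idosos ++ [paciente], demais)
        else
          (urgente, idosos_urgente, idosos, demais ++ [paciente])) (u, iu, i, d)
    = (u ++ l.filter (fun x => pvRank x == 1), iu ++ l.filter (fun x => pvRank x == 0),
       i ++ l.filter (fun x => pvRank x == 2), d ++ l.filter (fun x => pvRank x == 3)) := by
  show l.foldl stepA (u, iu, i, d) = _
  induction l generalizing u iu i d with
  | nil => simp
  | cons x l ih =>
    rw [List.foldl_cons]
    by_cases hu : PySem.Str.lower x.2.2 = "urgente" <;> by_cases ha : 60 ≤ x.2.1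
    · rw [stepA_00 u iu i d x hu ha, ih]
      simp [pvRank, hu, ha]
    · rw [stepA_01 u iu i d x hu ha, ih]
      simp [pvRank, hu, ha]
    · rw [stepA_02 u iu i d x hu ha, ih]
      simp [pvRank, hu, ha]
    · rw [stepA_03 u iu i d x hu ha, ih]
      simp [pvRank, hu, ha]

-- ===== VERDICT (by name: the statement is the Claim_ definition above) =====
theorem prioridade_spec : Claim_equal_prioridade := by
  intro pacientes _
  unfold Spec_prioridade prioridade prioridade_alt
  rw [loopA]
  dsimp only
  have hB : PySem.List.sorted2 pacientes pvRank (fun p => if pvRank p == 0 then -p.2.1 else 0)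
      = pacientes.foldl (fun acc x => PySem.List.insertBy pvLt x acc) [] := rfl
  rw [hB]
  have := loopB pacientes [] [] [] [] (by simp) (by simp) (by simp) (by simp)
  simp only [List.nil_append] at this
  rw [this]
  rw [PySem.List.sorted_rev_eq_foldl_insertBy]
  rw [show ([] : List (String × Int × String)) ++ List.filter (fun x => pvRank x == 0) pacientes
        = List.filter (fun x => pvRank x == 0) pacientes from List.nil_append _]
  rw [← PySem.List.foldl_if_eq_foldl_filter (fun x => pvRank x == 0)
        (fun acc x => PySem.List.insertBy (fun a b => decide (b.2.1 < a.2.1)) x acc)]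
  simp
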